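-- pv_equiv track=rewrite | github.com/drizztSun/common_project | PythonLeetcode/leetcodeM/1202_SmallestStringWithSwaps.py | doit_dfs
-- ===== SOURCE A (Python) =====
-- def doit_dfs(s: str, pairs: list) -> str:
--     from collections import defaultdict
--
--     graph = defaultdict(list)
--     for c1, c2 in pairs:
--         graph[c1].append(c2)
--         graph[c2].append(c1)
--
--     seen = set()
--     idx, tmp = [], []
--
--     def dfs(n):
--         if n in seen:
--             return
--
--         seen.add(n)
--         idx.append(n)
--         tmp.append(s[n])
--         for nx in graph[n]:
--             dfs(nx)
--
--     group = [w for w in s]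
--     for i in range(len(s)):
--         if i in seen or i not in graph:
--             continue
--         idx.clear()
--         tmp.clear()
--         dfs(i)
--         idx.sort()
--         tmp.sort()
--         for j in range(len(idx)):
--             group[idx[j]] = tmp[j]
--
--     return ''.join(group)
-- ===== SOURCE B (Python) =====
-- def doit_dfs(s: str, pairs: list) -> str:
--     # Label-merging instead of graph DFS: maintain a component label per index,
--     # collapse the two labels of each valid swap pair (pairs not indexing into s
--     # are ignored), then group indices by final label and hand the k-th smallest
--     # char of a group to its k-th smallest index.
--     n = len(s)
--     labels = list(range(n))
--     for a, b in pairs: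
--         if 0 <= a < n and 0 <= b < n:
--             la, lb = labels[a], labels[b]
--             if la != lb:
--                 labels = [la if x == lb else x for x in labels]
--     groups = {}
--     for i in range(n):
--         lab = labels[i]
--         groups[lab] = groups.get(lab, []) + [i]
--     out = list(s)
--     for idxs in groups.values():
--         for i, c in zip(idxs, sorted(s[i] for i in idxs)):
--             out[i] = c
--     return ''.join(out)
-- ===== Notes on version B (the rewrite author's own statement) =====
-- stated objective: alternative
-- what changed: Replaces the adjacency-dict + recursive DFS component search with a per-index component-label array collapsed pair by pair (no graph, no recursion, no visited set), then groups indices by final label and assigns sorted characters to sorted indices; Pre_ admits pairs whose entries are either both valid indices 0 <= i < len(s) or both invalid (A never touches those), and excludes wrong-arity rows (A raises ValueError) and mixed pairs, on which A raises IndexError or returns accidental negative-index wraparound values no specification would fix either way.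
-- outside the precondition, e.g. on doit_dfs('ab', [[-1, 0]]): A returns 'ba', B returns 'ab'; on doit_dfs('ab', [[0, 5], [1, 1]]): A raises IndexError, B returns 'ab'
import Mathlib
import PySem

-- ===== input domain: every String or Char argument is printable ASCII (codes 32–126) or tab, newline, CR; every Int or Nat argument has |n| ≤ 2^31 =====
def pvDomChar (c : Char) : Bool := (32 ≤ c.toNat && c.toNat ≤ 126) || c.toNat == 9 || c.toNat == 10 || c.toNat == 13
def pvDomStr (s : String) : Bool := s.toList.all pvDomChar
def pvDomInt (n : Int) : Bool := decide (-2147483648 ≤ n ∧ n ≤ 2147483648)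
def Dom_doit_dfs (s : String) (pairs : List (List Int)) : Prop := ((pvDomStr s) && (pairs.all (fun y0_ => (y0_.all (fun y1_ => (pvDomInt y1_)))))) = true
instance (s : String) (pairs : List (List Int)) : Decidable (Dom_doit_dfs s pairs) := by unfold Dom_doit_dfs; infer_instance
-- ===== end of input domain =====

-- B replaces A's adjacency-dict + recursive DFS by pair-by-pair collapsing of a
-- component-label array (no graph, no recursion, no visited set); neither version
-- mutates its arguments.

-- ===== PORT A =====

-- the defaultdict(list) adjacency map; a row that is not a 2-element list makes
-- Python raise ValueError (excluded by Pre_), so the wildcard branch is unreachable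
def pvBuildGraph (pairs : List (List Int)) : PySem.Dict Int (List Int) :=
  pairs.foldl (fun g p =>
    match p with
    | [c1, c2] =>
        let g1 := g.insert c1 (g.getD c1 [] ++ [c2])
        g1.insert c2 (g1.getD c2 [] ++ [c1])
    | _ => g) PySem.Dict.empty

-- the recursive dfs; the fuel only makes the recursion total: g.keys.length + 1
-- always suffices (every nested call has added a fresh graph key to seen).
-- s[n] is ported as pyGetD with junk default ' ': exact because under Pre_ every
-- visited node is a graph key, hence an in-range index
def pvDfsA (cs : List Char) (g : PySem.Dict Int (List Int)) :
    Nat → Int → List Int × List Int × List Char → List Int × List Int × List Char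
  | 0, _, st => st
  | f+1, x, st =>
      if PySem.Set.contains st.1 x then st
      else
        let st1 := (PySem.Set.add st.1 x, st.2.1 ++ [x], st.2.2 ++ [PySem.List.pyGetD cs x ' '])
        (g.getD x []).foldl (fun acc nx => pvDfsA cs g f nx acc) st1

-- one iteration of A's main 'for i in range(len(s))' loop (state: seen, group)
def pvStepA (cs : List Char) (g : PySem.Dict Int (List Int))
    (st : List Int × List Char) (i : Int) : List Int × List Char :=
  if PySem.Set.contains st.1 i || !g.contains i then st
  else
    let r := pvDfsA cs g (g.keys.length + 1) i (st.1, [], [])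
    let idxS := PySem.List.sorted r.2.1 (fun x => x) false
    let tmpS := PySem.List.sorted r.2.2 (fun c => c) false
    (r.1, (PySem.List.pyRange 0 (PySem.List.len idxS) 1).foldl
        (fun gl j => PySem.List.pySetD gl (PySem.List.pyGetD idxS j 0) (PySem.List.pyGetD tmpS j ' ')) st.2)

def doit_dfs (s : String) (pairs : List (List Int)) : String :=
  let cs := s.toList
  let g := pvBuildGraph pairs
  String.ofList (((PySem.List.pyRange 0 (PySem.List.len cs) 1).foldl (pvStepA cs g) (PySem.Set.empty, cs)).2)

-- ===== PORT B =====

-- collapse the two labels of one pair; pairs that do not index into s are ignored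
-- (the wildcard is unreachable under Pre_)
def pvLabelStep (n : Int) (L : List Int) (p : List Int) : List Int :=
  match p with
  | [a, b] =>
      if 0 ≤ a ∧ a < n ∧ 0 ≤ b ∧ b < n then
        let la := PySem.List.pyGetD L a 0
        let lb := PySem.List.pyGetD L b 0
        if la = lb then L else L.map (fun x => if x = lb then la else x)
      else L
  | _ => L

def pvLabels (n : Int) (pairs : List (List Int)) : List Int :=
  pairs.foldl (pvLabelStep n) (PySem.List.pyRange 0 n 1)

-- 'for i, c in zip(idxs, sorted(s[i] for i in idxs)): out[i] = c'
def pvAssign (cs : List Char) (gl : List Char) (idxs : List Int) : List Char :=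
  let chars := PySem.List.sorted (idxs.map (fun i => PySem.List.pyGetD cs i ' ')) (fun c => c) false
  (idxs.zip chars).foldl (fun g2 pc => PySem.List.pySetD g2 pc.1 pc.2) gl

def doit_dfs_alt (s : String) (pairs : List (List Int)) : String :=
  let cs := s.toList
  let n : Int := PySem.List.len cs
  let labels := pvLabels n pairs
  let groups := (PySem.List.pyRange 0 n 1).foldl
      (fun (d : PySem.Dict Int (List Int)) i => d.modify (PySem.List.pyGetD labels i 0) [] (· ++ [i]))
      PySem.Dict.empty
  String.ofList (groups.values.foldl (pvAssign cs) cs)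

-- ===== PRECONDITION & SPEC =====
-- Pre_ requires every pair to be a 2-element list whose entries are either both valid
-- indices 0 <= i < len(s) (a real swap pair) or both invalid (such a pair never meets
-- A's scan of range(len(s)), so A leaves it alone and returns).  Excluded are rows of
-- the wrong arity (A raises ValueError) and mixed pairs, on which A either raises
-- IndexError or, for negative in-range entries, returns accidental values produced by
-- Python's negative-index wraparound that no specification would fix either way.
def Pre_doit_dfs (s : String) (pairs : List (List Int)) : Prop :=
  ∀ p ∈ pairs, p.length = 2 ∧
    ((∀ x ∈ p, 0 ≤ x ∧ x < (s.toList.length : Int)) ∨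
     (∀ x ∈ p, ¬(0 ≤ x ∧ x < (s.toList.length : Int))))
instance (s : String) (pairs : List (List Int)) : Decidable (Pre_doit_dfs s pairs) := by
  unfold Pre_doit_dfs; infer_instance

def pvWitness_doit_dfs : String × List (List Int) := ("dcab", [[0, 3], [1, 2]])

def Spec_doit_dfs (s : String) (pairs : List (List Int)) (out : String) : Prop := out = doit_dfs_alt s pairs
instance (s : String) (pairs : List (List Int)) (out : String) : Decidable (Spec_doit_dfs s pairs out) := by unfold Spec_doit_dfs; infer_instance

-- ===== CLAIM (what is proved, stated in full; the proofs are below) =====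
def Claim_equal_doit_dfs : Prop := ∀ (s : String) (pairs : List (List Int)), Dom_doit_dfs s pairs → Pre_doit_dfs s pairs → Spec_doit_dfs s pairs (doit_dfs s pairs)

-- ===== LEMMAS AND PROOFS =====

-- ---- the swap relation generated by the pair list ----

def pvEdges (pairs : List (List Int)) : List (Int × Int) :=
  pairs.filterMap (fun p => match p with | [a, b] => some (a, b) | _ => none)

def pvStep (pairs : List (List Int)) (x y : Int) : Prop :=
  (x, y) ∈ pvEdges pairs ∨ (y, x) ∈ pvEdges pairs

def pvConn (pairs : List (List Int)) : Int → Int → Prop := Relation.ReflTransGen (pvStep pairs)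

def pvHasEdge (pairs : List (List Int)) (x : Int) : Prop := ∃ y, pvStep pairs x y

theorem pvStep_symm {pairs : List (List Int)} {x y : Int} (h : pvStep pairs x y) : pvStep pairs y x := h.symm

theorem pvConn_symm {pairs : List (List Int)} {x y : Int} (h : pvConn pairs x y) : pvConn pairs y x :=
  Relation.ReflTransGen.symmetric (fun _ _ hs => pvStep_symm hs) h

theorem pvEdges_append (l₁ l₂ : List (List Int)) : pvEdges (l₁ ++ l₂) = pvEdges l₁ ++ pvEdges l₂ := by
  simp [pvEdges]

theorem pvStep_append {l₁ l₂ : List (List Int)} {x y : Int} :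
    pvStep (l₁ ++ l₂) x y ↔ pvStep l₁ x y ∨ pvStep l₂ x y := by
  simp [pvStep, pvEdges_append]; tauto

theorem pvStep_single {a b x y : Int} :
    pvStep [[a, b]] x y ↔ (x = a ∧ y = b) ∨ (x = b ∧ y = a) := by
  simp [pvStep, pvEdges, Prod.ext_iff]; tauto

theorem reflTransGen_or_pair {r : Int → Int → Prop} (a b : Int) :
    ∀ i j : Int,
      Relation.ReflTransGen (fun x y => r x y ∨ ((x = a ∧ y = b) ∨ (x = b ∧ y = a))) i j ↔
        (Relation.ReflTransGen r i j ∨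
          (Relation.ReflTransGen r i a ∧ Relation.ReflTransGen r b j) ∨
          (Relation.ReflTransGen r i b ∧ Relation.ReflTransGen r a j)) := by
  intro i j
  constructor
  · intro h
    induction h with
    | refl => exact Or.inl Relation.ReflTransGen.refl
    | @tail c j h1 hs ih =>
      rcases hs with hr | ⟨rfl, rfl⟩ | ⟨rfl, rfl⟩
      · rcases ih with h' | ⟨h1', h2'⟩ | ⟨h1', h2'⟩
        · exact Or.inl (h'.tail hr)
        · exact Or.inr (Or.inl ⟨h1', h2'.tail hr⟩)
        · exact Or.inr (Or.inr ⟨h1', h2'.tail hr⟩)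
      · rcases ih with h' | ⟨h1', _⟩ | ⟨h1', _⟩
        · exact Or.inr (Or.inl ⟨h', Relation.ReflTransGen.refl⟩)
        · exact Or.inr (Or.inl ⟨h1', Relation.ReflTransGen.refl⟩)
        · exact Or.inl h1'
      · rcases ih with h' | ⟨h1', _⟩ | ⟨h1', _⟩
        · exact Or.inr (Or.inr ⟨h', Relation.ReflTransGen.refl⟩)
        · exact Or.inl h1'
        · exact Or.inr (Or.inr ⟨h1', Relation.ReflTransGen.refl⟩)
  · have hmono : ∀ {x y : Int}, Relation.ReflTransGen r x y →
        Relation.ReflTransGen (fun x y => r x y ∨ ((x = a ∧ y = b) ∨ (x = b ∧ y = a))) x y :=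
      fun h => Relation.ReflTransGen.mono (fun _ _ hr => Or.inl hr) h
    have hab : Relation.ReflTransGen (fun x y => r x y ∨ ((x = a ∧ y = b) ∨ (x = b ∧ y = a))) a b :=
      Relation.ReflTransGen.single (Or.inr (Or.inl ⟨rfl, rfl⟩))
    have hba : Relation.ReflTransGen (fun x y => r x y ∨ ((x = a ∧ y = b) ∨ (x = b ∧ y = a))) b a :=
      Relation.ReflTransGen.single (Or.inr (Or.inr ⟨rfl, rfl⟩))
    rintro (h | ⟨h1, h2⟩ | ⟨h1, h2⟩)
    · exact hmono h
    · exact ((hmono h1).trans hab).trans (hmono h2)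
    · exact ((hmono h1).trans hba).trans (hmono h2)

theorem reflTransGen_eq_of_no_step {r : Int → Int → Prop} {p q : Int}
    (h : Relation.ReflTransGen r p q) (hn : ∀ z, ¬ r p z) : q = p := by
  rcases Relation.ReflTransGen.cases_head h with rfl | ⟨c, hc, _⟩
  · rfl
  · exact absurd hc (hn c)

theorem mem_pvEdges {pairs : List (List Int)} {x y : Int} (h : (x, y) ∈ pvEdges pairs) :
    [x, y] ∈ pairs := by
  rw [pvEdges, List.mem_filterMap] at h
  obtain ⟨p, hp, hm⟩ := h
  rcases p with _ | ⟨a, _ | ⟨c, _ | t⟩⟩ <;> simp_all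

-- ---- the same relation restricted to the pairs that really index into s ----

def pvEdgesG (n : Int) (pairs : List (List Int)) : List (Int × Int) :=
  pairs.filterMap (fun p => match p with
    | [a, b] => if 0 ≤ a ∧ a < n ∧ 0 ≤ b ∧ b < n then some (a, b) else none
    | _ => none)

def pvStepG (n : Int) (pairs : List (List Int)) (x y : Int) : Prop :=
  (x, y) ∈ pvEdgesG n pairs ∨ (y, x) ∈ pvEdgesG n pairs

def pvConnG (n : Int) (pairs : List (List Int)) : Int → Int → Prop :=
  Relation.ReflTransGen (pvStepG n pairs)

theorem pvStepG_symm {n : Int} {pairs : List (List Int)} {x y : Int}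
    (h : pvStepG n pairs x y) : pvStepG n pairs y x := h.symm

theorem pvConnG_symm {n : Int} {pairs : List (List Int)} {x y : Int}
    (h : pvConnG n pairs x y) : pvConnG n pairs y x :=
  Relation.ReflTransGen.symmetric (fun _ _ hs => pvStepG_symm hs) h

theorem pvEdgesG_append (n : Int) (l₁ l₂ : List (List Int)) :
    pvEdgesG n (l₁ ++ l₂) = pvEdgesG n l₁ ++ pvEdgesG n l₂ := by
  simp [pvEdgesG]

theorem pvStepG_append {n : Int} {l₁ l₂ : List (List Int)} {x y : Int} :
    pvStepG n (l₁ ++ l₂) x y ↔ pvStepG n l₁ x y ∨ pvStepG n l₂ x y := by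
  simp [pvStepG, pvEdgesG_append]; tauto

theorem pvConnG_nil {n : Int} {x y : Int} : pvConnG n ([] : List (List Int)) x y ↔ x = y := by
  constructor
  · intro h; induction h with
    | refl => rfl
    | tail _ hs _ => simp [pvStepG, pvEdgesG] at hs
  · rintro rfl; exact Relation.ReflTransGen.refl

theorem pvConnG_append_skip {n : Int} {l : List (List Int)} {p : List Int}
    (hp : pvEdgesG n [p] = []) {i j : Int} :
    pvConnG n (l ++ [p]) i j ↔ pvConnG n l i j := by
  have hstep : ∀ x y, pvStepG n (l ++ [p]) x y ↔ pvStepG n l x y := by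
    intro x y
    rw [pvStepG_append]
    simp [pvStepG, hp]
  exact ⟨Relation.ReflTransGen.mono (fun a b h => (hstep a b).1 h),
         Relation.ReflTransGen.mono (fun a b h => (hstep a b).2 h)⟩

theorem pvStepG_single {n a b x y : Int} (hcond : 0 ≤ a ∧ a < n ∧ 0 ≤ b ∧ b < n) :
    pvStepG n [[a, b]] x y ↔ (x = a ∧ y = b) ∨ (x = b ∧ y = a) := by
  simp [pvStepG, pvEdgesG, hcond, Prod.ext_iff]
  tauto

theorem pvConnG_append_pair {n : Int} {l : List (List Int)} {a b : Int}
    (hcond : 0 ≤ a ∧ a < n ∧ 0 ≤ b ∧ b < n) (i j : Int) :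
    pvConnG n (l ++ [[a, b]]) i j ↔
      (pvConnG n l i j ∨ (pvConnG n l i a ∧ pvConnG n l b j) ∨
        (pvConnG n l i b ∧ pvConnG n l a j)) := by
  have hstep : ∀ x y, pvStepG n (l ++ [[a, b]]) x y ↔
      (fun x y => pvStepG n l x y ∨ ((x = a ∧ y = b) ∨ (x = b ∧ y = a))) x y := by
    intro x y
    rw [pvStepG_append, pvStepG_single hcond]
  exact Iff.trans
    ⟨Relation.ReflTransGen.mono (fun a' b' hab => (hstep a' b').1 hab),
     Relation.ReflTransGen.mono (fun a' b' hab => (hstep a' b').2 hab)⟩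
    (reflTransGen_or_pair a b i j)

theorem mem_pvEdgesG {n : Int} {pairs : List (List Int)} {x y : Int}
    (h : [x, y] ∈ pairs) (hb : 0 ≤ x ∧ x < n ∧ 0 ≤ y ∧ y < n) : (x, y) ∈ pvEdgesG n pairs := by
  rw [pvEdgesG, List.mem_filterMap]
  exact ⟨[x, y], h, by simp [hb.1, hb.2.1, hb.2.2.1, hb.2.2.2]⟩

theorem pvEdgesG_sub {n : Int} {pairs : List (List Int)} {x y : Int}
    (h : (x, y) ∈ pvEdgesG n pairs) : (x, y) ∈ pvEdges pairs := by
  rw [pvEdgesG, List.mem_filterMap] at h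
  obtain ⟨p, hp, hm⟩ := h
  rw [pvEdges, List.mem_filterMap]
  refine ⟨p, hp, ?_⟩
  rcases p with _ | ⟨a, _ | ⟨c, _ | ⟨e, t⟩⟩⟩
  · exact absurd hm (by simp)
  · exact absurd hm (by simp)
  · change (if 0 ≤ a ∧ a < n ∧ 0 ≤ c ∧ c < n then some (a, c) else none) = some (x, y) at hm
    change some (a, c) = some (x, y)
    by_cases hcond : 0 ≤ a ∧ a < n ∧ 0 ≤ c ∧ c < n
    · rwa [if_pos hcond] at hm
    · rw [if_neg hcond] at hm
      exact absurd hm (by simp)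
  · exact absurd hm (by simp)

theorem pvStepG_sub {n : Int} {pairs : List (List Int)} {x y : Int}
    (h : pvStepG n pairs x y) : pvStep pairs x y := by
  rcases h with h | h
  · exact Or.inl (pvEdgesG_sub h)
  · exact Or.inr (pvEdgesG_sub h)

-- under Pre_ a step leaving an in-range node is a step along a fully in-range pair
theorem pvStep_good {s : String} {pairs : List (List Int)} (hP : Pre_doit_dfs s pairs)
    {x y : Int} (h : pvStep pairs x y) (hx : 0 ≤ x ∧ x < (s.toList.length : Int)) :
    pvStepG (s.toList.length : Int) pairs x y ∧ (0 ≤ y ∧ y < (s.toList.length : Int)) := by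
  rcases h with h | h
  · have hm := mem_pvEdges h
    rcases (hP _ hm).2 with hin | hout
    · have hy := hin y (by simp)
      exact ⟨Or.inl (mem_pvEdgesG hm ⟨hx.1, hx.2, hy.1, hy.2⟩), hy⟩
    · exact absurd hx (hout x (by simp))
  · have hm := mem_pvEdges h
    rcases (hP _ hm).2 with hin | hout
    · have hy := hin y (by simp)
      exact ⟨Or.inr (mem_pvEdgesG hm ⟨hy.1, hy.2, hx.1, hx.2⟩), hy⟩
    · exact absurd hx (hout x (by simp))

theorem pvConn_range {s : String} {pairs : List (List Int)} (hP : Pre_doit_dfs s pairs)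
    {x y : Int} (h : pvConn pairs x y) (hx : 0 ≤ x ∧ x < (s.toList.length : Int)) :
    0 ≤ y ∧ y < (s.toList.length : Int) := by
  induction h with
  | refl => exact hx
  | tail _ hs ih => exact (pvStep_good hP hs ih).2

theorem pvConn_iff_good {s : String} {pairs : List (List Int)} (hP : Pre_doit_dfs s pairs)
    {x y : Int} (hx : 0 ≤ x ∧ x < (s.toList.length : Int)) :
    pvConn pairs x y ↔ pvConnG (s.toList.length : Int) pairs x y := by
  constructor
  · intro h
    induction h with
    | refl => exact Relation.ReflTransGen.refl
    | tail h1 hs ih =>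
      exact ih.tail (pvStep_good hP hs (pvConn_range hP h1 hx)).1
  · exact Relation.ReflTransGen.mono (fun _ _ hs => pvStepG_sub hs)

-- ---- the adjacency dict built by A ----

theorem pvStep_cons_pair {l : List (List Int)} {a b x y : Int} :
    pvStep ([a, b] :: l) x y ↔ ((x = a ∧ y = b) ∨ (x = b ∧ y = a)) ∨ pvStep l x y := by
  have : ([a, b] :: l) = [[a, b]] ++ l := rfl
  rw [this, pvStep_append, pvStep_single]
  try tauto

theorem pvStep_cons_junk {l : List (List Int)} {p : List Int} {x y : Int}
    (hp : pvEdges [p] = []) : pvStep (p :: l) x y ↔ pvStep l x y := by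
  have : (p :: l) = [p] ++ l := rfl
  rw [this, pvStep_append]
  simp [pvStep, hp]

theorem pvBuildGraph_step_adj (g : PySem.Dict Int (List Int)) (a b x y : Int) :
    y ∈ (((g.insert a (g.getD a [] ++ [b])).insert b
          ((g.insert a (g.getD a [] ++ [b])).getD b [] ++ [a])).getD x []) ↔
      y ∈ g.getD x [] ∨ ((x = a ∧ y = b) ∨ (x = b ∧ y = a)) := by
  rw [PySem.Dict.getD_insert]
  by_cases hxb : x = b
  · subst hxb
    rw [if_pos rfl, PySem.Dict.getD_insert]
    by_cases hba : x = a
    · subst hba; simp; try tauto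
    · rw [if_neg hba]; simp; try tauto
  · rw [if_neg hxb, PySem.Dict.getD_insert]
    by_cases hxa : x = a
    · subst hxa; simp [hxb]; try tauto
    · rw [if_neg hxa]; simp [hxa, hxb]

theorem pvBuildGraph_step_contains (g : PySem.Dict Int (List Int)) (a b x : Int) :
    (((g.insert a (g.getD a [] ++ [b])).insert b
          ((g.insert a (g.getD a [] ++ [b])).getD b [] ++ [a])).contains x) = true ↔
      g.contains x = true ∨ x = a ∨ x = b := by
  rw [PySem.Dict.contains_insert, PySem.Dict.contains_insert]
  simp [beq_iff_eq]; tauto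

theorem pvBuildGraph_aux (l : List (List Int)) : ∀ (g : PySem.Dict Int (List Int)) (x y : Int),
    (y ∈ ((l.foldl (fun g p =>
      match p with
      | [c1, c2] =>
          let g1 := g.insert c1 (g.getD c1 [] ++ [c2])
          g1.insert c2 (g1.getD c2 [] ++ [c1])
      | _ => g) g).getD x []) ↔ y ∈ g.getD x [] ∨ pvStep l x y) ∧
    ((l.foldl (fun g p =>
      match p with
      | [c1, c2] =>
          let g1 := g.insert c1 (g.getD c1 [] ++ [c2])
          g1.insert c2 (g1.getD c2 [] ++ [c1])
      | _ => g) g).contains x = true ↔ g.contains x = true ∨ pvHasEdge l x) := by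
  induction l with
  | nil =>
    intro g x y
    constructor
    · simp [pvStep, pvEdges]
    · simp [pvHasEdge, pvStep, pvEdges]
  | cons p l ih =>
    intro g x y
    rcases p with _ | ⟨a, _ | ⟨b, _ | ⟨c, t⟩⟩⟩
    · refine ⟨?_, ?_⟩
      · rw [List.foldl_cons, (ih g x y).1, pvStep_cons_junk (by simp [pvEdges])]
      · rw [List.foldl_cons, (ih g x y).2]
        have : pvHasEdge ([] :: l) x ↔ pvHasEdge l x := by
          unfold pvHasEdge
          exact exists_congr (fun z => pvStep_cons_junk (by simp [pvEdges]))
        rw [this]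
    · refine ⟨?_, ?_⟩
      · rw [List.foldl_cons, (ih _ x y).1, pvStep_cons_junk (by simp [pvEdges])]
      · rw [List.foldl_cons, (ih _ x y).2]
        have : pvHasEdge ([a] :: l) x ↔ pvHasEdge l x := by
          unfold pvHasEdge
          exact exists_congr (fun z => pvStep_cons_junk (by simp [pvEdges]))
        rw [this]
    · refine ⟨?_, ?_⟩
      · rw [List.foldl_cons, (ih _ x y).1]
        show y ∈ (((g.insert a (g.getD a [] ++ [b])).insert b
            ((g.insert a (g.getD a [] ++ [b])).getD b [] ++ [a])).getD x []) ∨ pvStep l x y ↔ _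
        rw [pvBuildGraph_step_adj, pvStep_cons_pair]
        tauto
      · rw [List.foldl_cons, (ih _ x y).2]
        show (((g.insert a (g.getD a [] ++ [b])).insert b
            ((g.insert a (g.getD a [] ++ [b])).getD b [] ++ [a])).contains x) = true ∨ _ ↔ _
        rw [pvBuildGraph_step_contains]
        have : pvHasEdge ([a, b] :: l) x ↔ (x = a ∨ x = b) ∨ pvHasEdge l x := by
          unfold pvHasEdge
          constructor
          · rintro ⟨z, hz⟩
            rcases pvStep_cons_pair.1 hz with (⟨rfl, rfl⟩ | ⟨rfl, rfl⟩) | h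
            · exact Or.inl (Or.inl rfl)
            · exact Or.inl (Or.inr rfl)
            · exact Or.inr ⟨z, h⟩
          · rintro ((rfl | rfl) | ⟨z, hz⟩)
            · exact ⟨b, pvStep_cons_pair.2 (Or.inl (Or.inl ⟨rfl, rfl⟩))⟩
            · exact ⟨a, pvStep_cons_pair.2 (Or.inl (Or.inr ⟨rfl, rfl⟩))⟩
            · exact ⟨z, pvStep_cons_pair.2 (Or.inr hz)⟩
        rw [this]
        tauto
    · refine ⟨?_, ?_⟩
      · rw [List.foldl_cons, (ih _ x y).1, pvStep_cons_junk (by simp [pvEdges])]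
      · rw [List.foldl_cons, (ih _ x y).2]
        have : pvHasEdge ((a :: b :: c :: t) :: l) x ↔ pvHasEdge l x := by
          unfold pvHasEdge
          exact exists_congr (fun z => pvStep_cons_junk (by simp [pvEdges]))
        rw [this]

theorem pvBuildGraph_adj (pairs : List (List Int)) (x y : Int) :
    y ∈ (pvBuildGraph pairs).getD x [] ↔ pvStep pairs x y := by
  have h := (pvBuildGraph_aux pairs PySem.Dict.empty x y).1
  simpa [pvBuildGraph, PySem.Dict.getD_empty] using h

theorem pvBuildGraph_contains (pairs : List (List Int)) (x : Int) :
    (pvBuildGraph pairs).contains x = true ↔ pvHasEdge pairs x := by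
  have h := (pvBuildGraph_aux pairs PySem.Dict.empty x 0).2
  simpa [pvBuildGraph, PySem.Dict.contains_empty] using h

-- ---- the final labels of B name exactly the connected components ----


theorem pvLabelStep_length (n : Int) (L : List Int) (p : List Int) :
    (pvLabelStep n L p).length = L.length := by
  rcases p with _ | ⟨a, _ | ⟨b, _ | ⟨c, t⟩⟩⟩ <;> simp [pvLabelStep]
  split
  · split <;> simp
  · rfl

theorem pvLabels_foldl_length (n : Int) (l : List (List Int)) (L : List Int) :
    (l.foldl (pvLabelStep n) L).length = L.length := by
  induction l generalizing L with
  | nil => rfl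
  | cons p l ih => rw [List.foldl_cons, ih, pvLabelStep_length]

theorem pvLabels_aux (N : Nat) (l : List (List Int)) :
    ∀ i j : Int, 0 ≤ i → i < (N : Int) → 0 ≤ j → j < (N : Int) →
      (PySem.List.pyGetD (l.foldl (pvLabelStep (N : Int)) (PySem.List.pyRange 0 (N : Int) 1)) i 0 =
        PySem.List.pyGetD (l.foldl (pvLabelStep (N : Int)) (PySem.List.pyRange 0 (N : Int) 1)) j 0 ↔
        pvConnG (N : Int) l i j) := by
  induction l using List.reverseRecOn with
  | nil =>
    intro i j hi0 hiN hj0 hjN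
    have hlen : (PySem.List.pyRange 0 (N : Int) 1).length = N := by
      rw [PySem.List.length_pyRange_one]; omega
    rw [List.foldl_nil,
      PySem.List.pyGetD_eq_getElem _ _ hi0 (by rw [hlen]; omega),
      PySem.List.pyGetD_eq_getElem _ _ hj0 (by rw [hlen]; omega)]
    rw [pvConnG_nil]
    have hgi : (PySem.List.pyRange 0 (N : Int) 1)[i.toNat]'(by omega) = 0 + (i.toNat : Int) :=
      PySem.List.getElem_pyRange_one ..
    have hgj : (PySem.List.pyRange 0 (N : Int) 1)[j.toNat]'(by omega) = 0 + (j.toNat : Int) :=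
      PySem.List.getElem_pyRange_one ..
    rw [hgi, hgj]
    omega
  | append_singleton l p ih =>
    intro i j hi0 hiN hj0 hjN
    set L := l.foldl (pvLabelStep (N : Int)) (PySem.List.pyRange 0 (N : Int) 1) with hL
    have hlen : L.length = N := by
      rw [hL, pvLabels_foldl_length, PySem.List.length_pyRange_one]; omega
    rw [List.foldl_append, List.foldl_cons, List.foldl_nil]
    -- pairs that are skipped (wrong arity or not fully in range) change nothing
    have hskip : ∀ (hstep : pvLabelStep (N : Int) L p = L) (hedge : pvEdgesG (N : Int) [p] = []),
        (PySem.List.pyGetD (pvLabelStep (N : Int) L p) i 0 =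
          PySem.List.pyGetD (pvLabelStep (N : Int) L p) j 0 ↔ pvConnG (N : Int) (l ++ [p]) i j) := by
      intro hstep hedge
      rw [hstep, pvConnG_append_skip hedge]
      exact ih i j hi0 hiN hj0 hjN
    rcases p with _ | ⟨a, _ | ⟨b, _ | ⟨c, t⟩⟩⟩
    · exact hskip rfl rfl
    · exact hskip rfl rfl
    · by_cases hcond : 0 ≤ a ∧ a < (N : Int) ∧ 0 ≤ b ∧ b < (N : Int)
      · -- a genuine swap pair
        obtain ⟨ha0, haN, hb0, hbN⟩ := hcond
        have hstep0 : pvLabelStep (N : Int) L [a, b] =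
            (if PySem.List.pyGetD L a 0 = PySem.List.pyGetD L b 0 then L
              else L.map (fun x => if x = PySem.List.pyGetD L b 0 then PySem.List.pyGetD L a 0 else x)) := by
          change (if 0 ≤ a ∧ a < (N : Int) ∧ 0 ≤ b ∧ b < (N : Int) then
              (if PySem.List.pyGetD L a 0 = PySem.List.pyGetD L b 0 then L
                else L.map (fun x => if x = PySem.List.pyGetD L b 0 then PySem.List.pyGetD L a 0 else x))
              else L) = _
          rw [if_pos (⟨ha0, haN, hb0, hbN⟩ : 0 ≤ a ∧ a < (N : Int) ∧ 0 ≤ b ∧ b < (N : Int))]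
        rw [hstep0, pvConnG_append_pair ⟨ha0, haN, hb0, hbN⟩]
        have hconn_ab : PySem.List.pyGetD L a 0 = PySem.List.pyGetD L b 0 ↔ pvConnG (N : Int) l a b :=
          ih a b ha0 haN hb0 hbN
        by_cases hab : PySem.List.pyGetD L a 0 = PySem.List.pyGetD L b 0
        · rw [if_pos hab, ih i j hi0 hiN hj0 hjN]
          have hcab : pvConnG (N : Int) l a b := hconn_ab.1 hab
          constructor
          · exact Or.inl
          · rintro (h | ⟨h1, h2⟩ | ⟨h1, h2⟩)
            · exact h
            · exact (h1.trans hcab).trans h2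
            · exact (h1.trans (pvConnG_symm hcab)).trans h2
        · rw [if_neg hab]
          have hget : ∀ k : Int, 0 ≤ k → k < (N : Int) →
              PySem.List.pyGetD
                (L.map (fun x => if x = PySem.List.pyGetD L b 0 then PySem.List.pyGetD L a 0 else x)) k 0 =
                (fun x => if x = PySem.List.pyGetD L b 0 then PySem.List.pyGetD L a 0 else x)
                  (PySem.List.pyGetD L k 0) := by
            intro k hk0 hkN
            rw [PySem.List.pyGetD_eq_getElem _ _ hk0 (by simp [hlen]; omega),
              PySem.List.pyGetD_eq_getElem _ _ hk0 (by simp [hlen]; omega)]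
            simp
          rw [hget i hi0 hiN, hget j hj0 hjN]
          simp only []
          set la := PySem.List.pyGetD L a 0 with hla
          set lb := PySem.List.pyGetD L b 0 with hlb
          set Li := PySem.List.pyGetD L i 0 with hLi
          set Lj := PySem.List.pyGetD L j 0 with hLj
          have hij : Li = Lj ↔ pvConnG (N : Int) l i j := ih i j hi0 hiN hj0 hjN
          have hia : Li = la ↔ pvConnG (N : Int) l i a := ih i a hi0 hiN ha0 haN
          have hib : Li = lb ↔ pvConnG (N : Int) l i b := ih i b hi0 hiN hb0 hbN
          have hja : Lj = la ↔ pvConnG (N : Int) l j a := ih j a hj0 hjN ha0 haN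
          have hjb : Lj = lb ↔ pvConnG (N : Int) l j b := ih j b hj0 hjN hb0 hbN
          constructor
          · intro h
            by_cases hi : Li = lb <;> by_cases hj : Lj = lb
            · exact Or.inl (hij.1 (hi.trans hj.symm))
            · rw [if_pos hi, if_neg hj] at h
              exact Or.inr (Or.inr ⟨hib.1 hi, pvConnG_symm (hja.1 h.symm)⟩)
            · rw [if_neg hi, if_pos hj] at h
              exact Or.inr (Or.inl ⟨hia.1 h, pvConnG_symm (hjb.1 hj)⟩)
            · rw [if_neg hi, if_neg hj] at h
              exact Or.inl (hij.1 h)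
          · rintro (h | ⟨h1, h2⟩ | ⟨h1, h2⟩)
            · have hLij : Li = Lj := hij.2 h
              by_cases hi : Li = lb
              · rw [if_pos hi, if_pos (hLij ▸ hi)]
              · rw [if_neg hi, if_neg (fun hc => hi (hLij.trans hc)), hLij]
            · have hi : Li = la := hia.2 h1
              have hj : Lj = lb := hjb.2 (pvConnG_symm h2)
              rw [if_pos hj]
              by_cases hilb : Li = lb
              · rw [if_pos hilb]
              · rw [if_neg hilb, hi]
            · have hi : Li = lb := hib.2 h1
              have hj : Lj = la := hja.2 (pvConnG_symm h2)
              rw [if_pos hi]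
              by_cases hjlb : Lj = lb
              · rw [if_pos hjlb]
              · rw [if_neg hjlb, hj]
      · -- an out-of-range pair: ignored by B, disconnected from A's scan
        refine hskip ?_ ?_
        · change (if 0 ≤ a ∧ a < (N : Int) ∧ 0 ≤ b ∧ b < (N : Int) then
              (if PySem.List.pyGetD L a 0 = PySem.List.pyGetD L b 0 then L
                else L.map (fun x => if x = PySem.List.pyGetD L b 0 then PySem.List.pyGetD L a 0 else x))
              else L) = L
          rw [if_neg hcond]
        · simp only [pvEdgesG, List.filterMap]
          rw [if_neg hcond]
    · exact hskip rfl rfl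

theorem pvLabels_iff {s : String} {pairs : List (List Int)} :
    ∀ i j : Int, 0 ≤ i → i < (s.toList.length : Int) → 0 ≤ j → j < (s.toList.length : Int) →
      (PySem.List.pyGetD (pvLabels (PySem.List.len s.toList) pairs) i 0 =
        PySem.List.pyGetD (pvLabels (PySem.List.len s.toList) pairs) j 0 ↔
        pvConnG (s.toList.length : Int) pairs i j) := by
  intro i j hi0 hiN hj0 hjN
  have hlen : PySem.List.len s.toList = (s.toList.length : Int) := by simp
  rw [pvLabels, hlen]
  exact pvLabels_aux s.toList.length pairs i j hi0 hiN hj0 hjN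

-- ---- names for the common value both programs compute ----

def pvLab (s : String) (pairs : List (List Int)) (i : Int) : Int :=
  PySem.List.pyGetD (pvLabels (PySem.List.len s.toList) pairs) i 0

def pvComp (s : String) (pairs : List (List Int)) (i : Int) : List Int :=
  (PySem.List.pyRange 0 (PySem.List.len s.toList) 1).filter (fun q => pvLab s pairs q == pvLab s pairs i)

def pvTarget (s : String) (pairs : List (List Int)) (p : Int) : Char :=
  (PySem.List.sorted ((pvComp s pairs p).map (fun i => PySem.List.pyGetD s.toList i ' ')) (fun c => c) false).getD
    ((pvComp s pairs p).idxOf p) ' '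

theorem pvEqSingleton {l : List Int} {a : Int} (h : l.Nodup) (hm : ∀ x, x ∈ l ↔ x = a) : l = [a] := by
  have hp : l.Perm [a] := (List.perm_ext_iff_of_nodup h (by simp)).2 (by simp [hm])
  exact List.perm_singleton.1 hp

theorem mem_pvComp {s : String} {pairs : List (List Int)} {i q : Int} :
    q ∈ pvComp s pairs i ↔ (0 ≤ q ∧ q < (s.toList.length : Int)) ∧ pvLab s pairs q = pvLab s pairs i := by
  unfold pvComp
  rw [List.mem_filter]
  simp [PySem.List.mem_pyRange_one]
  try tauto

theorem pvComp_nodup (s : String) (pairs : List (List Int)) (i : Int) : (pvComp s pairs i).Nodup := by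
  exact (PySem.List.nodup_pyRange_one 0 _).filter _

theorem pvComp_pairwise (s : String) (pairs : List (List Int)) (i : Int) :
    (pvComp s pairs i).Pairwise (· < ·) := by
  exact (PySem.List.pairwise_lt_pyRange_one 0 _).sublist (List.filter_sublist ..)

theorem pvComp_eq_of_lab_eq {s : String} {pairs : List (List Int)} {i j : Int}
    (h : pvLab s pairs i = pvLab s pairs j) : pvComp s pairs i = pvComp s pairs j := by
  unfold pvComp
  rw [h]

-- an index touched by no pair forms the singleton class [p], so both programs keep s[p]
theorem pvComp_singleton {s : String} {pairs : List (List Int)}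
    {p : Int} (hp : 0 ≤ p ∧ p < (s.toList.length : Int)) (hno : ¬ pvHasEdge pairs p) :
    pvComp s pairs p = [p] := by
  apply pvEqSingleton (pvComp_nodup s pairs p)
  intro q
  rw [mem_pvComp]
  constructor
  · rintro ⟨hq, hlab⟩
    have hconnG : pvConnG (s.toList.length : Int) pairs q p :=
      (pvLabels_iff q p hq.1 hq.2 hp.1 hp.2).1 hlab
    have hnoG : ∀ z, ¬ pvStepG (s.toList.length : Int) pairs p z :=
      fun z hz => hno ⟨z, pvStepG_sub hz⟩
    exact reflTransGen_eq_of_no_step (pvConnG_symm hconnG) hnoG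
  · rintro rfl
    exact ⟨hp, rfl⟩

theorem pvTarget_isolated {s : String} {pairs : List (List Int)}
    {p : Int} (hp : 0 ≤ p ∧ p < (s.toList.length : Int)) (hno : ¬ pvHasEdge pairs p) :
    pvTarget s pairs p = s.toList.getD p.toNat ' ' := by
  unfold pvTarget
  rw [pvComp_singleton hp hno]
  have hlt : p.toNat < s.toList.length := by omega
  have h1 : PySem.List.pyGetD s.toList p ' ' = s.toList[p.toNat] :=
    PySem.List.pyGetD_eq_getElem _ _ hp.1 hp.2
  simp [h1, List.getD, List.getElem?_eq_getElem hlt,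
    PySem.List.sorted_eq_self_of_pairwise [s.toList[p.toNat]] (fun c => c) (List.pairwise_singleton _ _)]

-- ---- the zip-assignment loop, shared by both programs ----


-- A writes group[idx[j]] = tmp[j] for j in range(len(idx)): the same zip fold

theorem pvZipAssign_spec (u : List Int) : ∀ (v : List Char) (gl : List Char),
    u.Nodup → u.length = v.length →
    (∀ x ∈ u, 0 ≤ x ∧ x < (gl.length : Int)) →
    ((u.zip v).foldl (fun g2 pc => PySem.List.pySetD g2 pc.1 pc.2) gl).length = gl.length ∧
    (∀ k : Nat, ∀ hk : k < u.length,
      ((u.zip v).foldl (fun g2 pc => PySem.List.pySetD g2 pc.1 pc.2) gl).getD (u[k]).toNat ' ' = v.getD k ' ') ∧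
    (∀ p : Nat, (p : Int) ∉ u →
      ((u.zip v).foldl (fun g2 pc => PySem.List.pySetD g2 pc.1 pc.2) gl).getD p ' ' = gl.getD p ' ') := by
  induction u with
  | nil =>
    intro v gl _ _ _
    refine ⟨rfl, ?_, ?_⟩
    · intro k hk; exact absurd hk (by simp)
    · intro p _; rfl
  | cons x u ih =>
    intro v gl hnd hlen hr
    rcases v with _ | ⟨y, v⟩
    · simp at hlen
    have hx := hr x (by simp)
    have hset : PySem.List.pySetD gl x y = gl.set x.toNat y :=
      PySem.List.pySetD_of_nonneg gl y hx.1
    have hlen1 : (gl.set x.toNat y).length = gl.length := by simp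
    have hnd' : u.Nodup := hnd.of_cons
    have hxn : x ∉ u := by
      intro hc; exact (List.nodup_cons.1 hnd).1 hc
    have hr' : ∀ z ∈ u, 0 ≤ z ∧ z < ((gl.set x.toNat y).length : Int) := by
      intro z hz; rw [hlen1]; exact hr z (by simp [hz])
    obtain ⟨ihlen, ih2, ih3⟩ := ih v (gl.set x.toNat y) hnd' (by simpa using hlen) hr'
    have hfold : ((x :: u).zip (y :: v)).foldl (fun g2 pc => PySem.List.pySetD g2 pc.1 pc.2) gl =
        (u.zip v).foldl (fun g2 pc => PySem.List.pySetD g2 pc.1 pc.2) (gl.set x.toNat y) := by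
      simp [hset]
    refine ⟨by rw [hfold, ihlen, hlen1], ?_, ?_⟩
    · intro k hk
      match k with
      | 0 =>
        rw [hfold]
        have : ((x :: u)[0]).toNat = x.toNat := rfl
        rw [this]
        have h3 := ih3 x.toNat (by
          intro hc
          have : (x.toNat : Int) = x := by omega
          rw [this] at hc
          exact hxn hc)
        rw [h3]
        have hlt : x.toNat < gl.length := by omega
        rw [List.getD_eq_getElem _ _ (by simpa using hlt)]
        simp [List.getElem_set_self]
      | k+1 =>
        rw [hfold]
        have : ((x :: u)[k+1]) = u[k]'(by simpa using hk) := by simp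
        rw [this]
        exact ih2 k (by simpa using hk)
    · intro p hp
      have hpx : (p : Int) ≠ x := by intro hc; exact hp (by simp [hc])
      have hpu : (p : Int) ∉ u := fun hc => hp (by simp [hc])
      rw [hfold, ih3 p hpu]
      by_cases hlt : p < gl.length
      · rw [List.getD_eq_getElem (gl.set x.toNat y) ' ' (n := p) (by simpa using hlt),
          List.getD_eq_getElem gl ' ' (n := p) hlt]
        have hne : x.toNat ≠ p := by omega
        exact List.getElem_set_ne hne _
      · rw [List.getD_eq_default (gl.set x.toNat y) ' ' (n := p) (by simp only [List.length_set]; omega),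
          List.getD_eq_default gl ' ' (n := p) (by omega)]

theorem pvRangeFold_eq_zip (u : List Int) : ∀ (v : List Char) (gl : List Char), u.length = v.length →
    (PySem.List.pyRange 0 (PySem.List.len u) 1).foldl
        (fun gl j => PySem.List.pySetD gl (PySem.List.pyGetD u j 0) (PySem.List.pyGetD v j ' ')) gl =
      (u.zip v).foldl (fun g2 pc => PySem.List.pySetD g2 pc.1 pc.2) gl := by
  induction u with
  | nil =>
    intro v gl _
    rw [show PySem.List.len ([] : List Int) = 0 by simp, PySem.List.pyRange_one_eq_nil (by omega)]
    simp
  | cons x u ih =>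
    intro v gl hlen
    rcases v with _ | ⟨y, v⟩
    · simp at hlen
    have hlenu : PySem.List.len (x :: u) = (((u.length + 1 : Nat)) : Int) := by simp
    rw [hlenu, PySem.List.pyRange_one_cons (a := 0) (b := ((u.length + 1 : Nat) : Int))
      (by exact_mod_cast Nat.succ_pos u.length), show (0 : Int) + 1 = 1 by norm_num]
    rw [List.foldl_cons]
    have h0 : PySem.List.pySetD gl (PySem.List.pyGetD (x :: u) 0 0) (PySem.List.pyGetD (y :: v) 0 ' ') =
        PySem.List.pySetD gl x y := by
      rw [PySem.List.pyGetD_zero_cons, PySem.List.pyGetD_zero_cons]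
    rw [h0]
    have hrange : PySem.List.pyRange 1 (((u.length + 1 : Nat)) : Int) 1 =
        (List.range u.length).map (fun k : Nat => 1 + (k : Int)) := by
      rw [PySem.List.pyRange_one]
      have h1 : ((((u.length + 1 : Nat)) : Int) - 1).toNat = u.length := by omega
      rw [h1]
    have hrange' : PySem.List.pyRange 0 (PySem.List.len u) 1 =
        (List.range u.length).map (fun k : Nat => ((k : Int))) := by
      rw [show PySem.List.len u = (u.length : Int) by simp, PySem.List.pyRange_one]
      have h1 : ((u.length : Int) - 0).toNat = u.length := by omega
      rw [h1]
      apply List.map_congr_left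
      intro k _
      simp
    rw [hrange]
    have hbody : ((List.range u.length).map (fun k : Nat => 1 + (k : Int))).foldl
        (fun gl j => PySem.List.pySetD gl (PySem.List.pyGetD (x :: u) j 0) (PySem.List.pyGetD (y :: v) j ' '))
        (PySem.List.pySetD gl x y) =
        (List.range u.length).foldl
        (fun gl (k : Nat) => PySem.List.pySetD gl (PySem.List.pyGetD u (k : Int) 0) (PySem.List.pyGetD v (k : Int) ' '))
        (PySem.List.pySetD gl x y) := by
      rw [List.foldl_map]
      apply PySem.List.foldl_congr_mem
      intro acc k _
      have e1 : PySem.List.pyGetD (x :: u) (1 + (k : Int)) 0 = PySem.List.pyGetD u (k : Int) 0 := by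
        rw [show (1 + (k : Int)) = ((k + 1 : Nat) : Int) by push_cast; ring,
          PySem.List.pyGetD_natCast, PySem.List.pyGetD_natCast]
        rfl
      have e2 : PySem.List.pyGetD (y :: v) (1 + (k : Int)) ' ' = PySem.List.pyGetD v (k : Int) ' ' := by
        rw [show (1 + (k : Int)) = ((k + 1 : Nat) : Int) by push_cast; ring,
          PySem.List.pyGetD_natCast, PySem.List.pyGetD_natCast]
        rfl
      rw [e1, e2]
    rw [hbody]
    have hzip : ((x :: u).zip (y :: v)).foldl (fun g2 pc => PySem.List.pySetD g2 pc.1 pc.2) gl =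
        (u.zip v).foldl (fun g2 pc => PySem.List.pySetD g2 pc.1 pc.2) (PySem.List.pySetD gl x y) := by
      simp
    rw [hzip, ← ih v (PySem.List.pySetD gl x y) (by simpa using hlen), hrange', List.foldl_map]

-- the class of p, assigned into gl, puts pvTarget at every member and keeps the rest
theorem pvAssignComp_spec {s : String} {pairs : List (List Int)}
    (q : Int) (gl : List Char) (hgl : gl.length = s.toList.length) :
    (pvAssign s.toList gl (pvComp s pairs q)).length = s.toList.length ∧
    ∀ p : Nat, p < s.toList.length →
      (pvAssign s.toList gl (pvComp s pairs q)).getD p ' ' =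
        if pvLab s pairs p = pvLab s pairs q then pvTarget s pairs p else gl.getD p ' ' := by
  have hnd := pvComp_nodup s pairs q
  have hlen : (pvComp s pairs q).length =
      (PySem.List.sorted ((pvComp s pairs q).map (fun i => PySem.List.pyGetD s.toList i ' '))
        (fun c => c) false).length := by
    rw [PySem.List.length_sorted, List.length_map]
  have hr : ∀ x ∈ pvComp s pairs q, 0 ≤ x ∧ x < (gl.length : Int) := by
    intro x hx
    have := (mem_pvComp.1 hx).1
    rw [hgl]
    exact this
  obtain ⟨hL, h2, h3⟩ := pvZipAssign_spec (pvComp s pairs q) _ gl hnd hlen hr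
  constructor
  · exact hL.trans hgl
  · intro p hp
    by_cases hlab : pvLab s pairs (p : Int) = pvLab s pairs q
    · have hmem : (p : Int) ∈ pvComp s pairs q :=
        mem_pvComp.2 ⟨⟨by omega, by omega⟩, hlab⟩
      have hk : (pvComp s pairs q).idxOf (p : Int) < (pvComp s pairs q).length :=
        List.idxOf_lt_length_of_mem hmem
      have huk : (pvComp s pairs q)[(pvComp s pairs q).idxOf (p : Int)]'hk = (p : Int) :=
        List.getElem_idxOf hk
      have h2' := h2 _ hk
      rw [huk] at h2'
      have htn : ((p : Int)).toNat = p := by omega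
      rw [htn] at h2'
      rw [if_pos hlab]
      have e2 : pvTarget s pairs (p : Int) =
          (PySem.List.sorted ((pvComp s pairs q).map (fun i => PySem.List.pyGetD s.toList i ' '))
            (fun c => c) false).getD ((pvComp s pairs q).idxOf (p : Int)) ' ' := by
        unfold pvTarget
        rw [pvComp_eq_of_lab_eq hlab]
      rw [e2]
      exact h2'
    · have hnot : (p : Int) ∉ pvComp s pairs q := fun hc => hlab (mem_pvComp.1 hc).2
      rw [if_neg hlab]
      exact h3 p hnot

-- ---- A's dfs visits exactly the component ----

def pvUnseen (g : PySem.Dict Int (List Int)) (seen : List Int) : Nat :=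
  (g.keys.filter (fun k => decide (k ∉ seen))).length

theorem pvUnseen_mono (g : PySem.Dict Int (List Int)) {seen seen' : List Int}
    (h : ∀ y ∈ seen, y ∈ seen') : pvUnseen g seen' ≤ pvUnseen g seen := by
  unfold pvUnseen
  exact (List.monotone_filter_right _ (by
    intro a ha
    simp only [decide_eq_true_eq] at ha ⊢
    intro hc
    exact ha (h a hc))).length_le

theorem pvUnseen_lt (g : PySem.Dict Int (List Int)) {seen seen' : List Int} {x : Int}
    (hxk : g.contains x = true) (hxs : x ∉ seen)
    (h : ∀ y ∈ seen, y ∈ seen') (hx' : x ∈ seen') : pvUnseen g seen' < pvUnseen g seen := by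
  unfold pvUnseen
  have hsub : List.Sublist (g.keys.filter (fun k => decide (k ∉ seen')))
      (g.keys.filter (fun k => decide (k ∉ seen))) :=
    List.monotone_filter_right _ (by
      intro a ha
      simp only [decide_eq_true_eq] at ha ⊢
      intro hc
      exact ha (h a hc))
  rcases Nat.lt_or_ge (g.keys.filter (fun k => decide (k ∉ seen'))).length
      (g.keys.filter (fun k => decide (k ∉ seen))).length with hlt | hge
  · exact hlt
  · exfalso
    have heq := hsub.eq_of_length (Nat.le_antisymm hsub.length_le hge)
    have hxmem : x ∈ g.keys.filter (fun k => decide (k ∉ seen)) := by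
      rw [List.mem_filter]
      exact ⟨(PySem.Dict.contains_iff_mem_keys ..).1 hxk, by simpa using hxs⟩
    rw [← heq, List.mem_filter] at hxmem
    have := hxmem.2
    simp only [decide_eq_true_eq] at this
    exact this hx'

theorem pvDfsA_spec {s : String} {pairs : List (List Int)} :
    ∀ (f : Nat) (x : Int) (seen idx : List Int) (tmp : List Char),
      seen.Nodup →
      (pvBuildGraph pairs).contains x = true →
      pvUnseen (pvBuildGraph pairs) seen < f →
      ∃ Δ : List Int,
        pvDfsA s.toList (pvBuildGraph pairs) f x (seen, idx, tmp)
          = (seen ++ Δ, idx ++ Δ, tmp ++ Δ.map (fun i => PySem.List.pyGetD s.toList i ' ')) ∧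
        (seen ++ Δ).Nodup ∧
        x ∈ seen ++ Δ ∧
        (∀ y ∈ Δ, pvConn pairs x y) ∧
        (∀ y ∈ Δ, ∀ z, pvStep pairs y z → z ∈ seen ++ Δ) := by
  intro f
  induction f with
  | zero => intro x seen idx tmp _ _ hfuel; omega
  | succ f ihf =>
    intro x seen idx tmp hnd hcx hfuel
    by_cases hxseen : x ∈ seen
    · refine ⟨[], ?_, by simpa using hnd, by simpa using hxseen, by simp, by simp⟩
      show (if PySem.Set.contains seen x then _ else _) = _
      rw [if_pos ((PySem.Set.contains_iff ..).2 hxseen)]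
      simp
    · -- x is fresh: it is added, then all its neighbours are folded over
      have hadd : PySem.Set.add seen x = seen ++ [x] := PySem.Set.add_of_not_mem hxseen
      have hnd1 : (seen ++ [x]).Nodup := by
        simp [List.nodup_append, hnd]
        intro a ha hax
        exact hxseen (hax ▸ ha)
      have hfuel1 : pvUnseen (pvBuildGraph pairs) (seen ++ [x]) < f := by
        have hdec : pvUnseen (pvBuildGraph pairs) (seen ++ [x]) < pvUnseen (pvBuildGraph pairs) seen :=
          pvUnseen_lt _ hcx hxseen (by intro y hy; simp [hy]) (by simp)
        omega
      -- the inner fold over any list of graph keys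
      have hfold : ∀ (ns : List Int), (∀ nx ∈ ns, (pvBuildGraph pairs).contains nx = true) →
          ∀ (seen1 idx1 : List Int) (tmp1 : List Char), seen1.Nodup →
          pvUnseen (pvBuildGraph pairs) seen1 < f →
          ∃ Δ : List Int,
            ns.foldl (fun acc nx => pvDfsA s.toList (pvBuildGraph pairs) f nx acc) (seen1, idx1, tmp1)
              = (seen1 ++ Δ, idx1 ++ Δ, tmp1 ++ Δ.map (fun i => PySem.List.pyGetD s.toList i ' ')) ∧
            (seen1 ++ Δ).Nodup ∧
            (∀ nx ∈ ns, nx ∈ seen1 ++ Δ) ∧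
            (∀ y ∈ Δ, ∃ nx ∈ ns, pvConn pairs nx y) ∧
            (∀ y ∈ Δ, ∀ z, pvStep pairs y z → z ∈ seen1 ++ Δ) := by
        intro ns
        induction ns with
        | nil =>
          intro _ seen1 idx1 tmp1 hnd1' _
          exact ⟨[], by simp, by simpa using hnd1', by simp, by simp, by simp⟩
        | cons nx ns ihns =>
          intro hconts seen1 idx1 tmp1 hnd1' hfuel1'
          obtain ⟨Δ1, heq1, hnd2, hmem1, hconn1, hcl1⟩ :=
            ihf nx seen1 idx1 tmp1 hnd1' (hconts nx (by simp)) hfuel1'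
          have hfuel2 : pvUnseen (pvBuildGraph pairs) (seen1 ++ Δ1) < f :=
            lt_of_le_of_lt (pvUnseen_mono _ (by intro y hy; simp [hy])) hfuel1'
          obtain ⟨Δ2, heq2, hnd3, hmem2, hconn2, hcl2⟩ :=
            ihns (fun nx' hnx' => hconts nx' (by simp [hnx'])) (seen1 ++ Δ1) (idx1 ++ Δ1)
              (tmp1 ++ Δ1.map (fun i => PySem.List.pyGetD s.toList i ' ')) hnd2 hfuel2
          refine ⟨Δ1 ++ Δ2, ?_, ?_, ?_, ?_, ?_⟩
          · rw [List.foldl_cons, heq1, heq2]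
            simp [List.append_assoc]
          · rw [← List.append_assoc]; exact hnd3
          · intro nx' hnx'
            rcases List.mem_cons.1 hnx' with rfl | hm
            · rcases List.mem_append.1 hmem1 with h | h
              · exact List.mem_append.2 (Or.inl h)
              · exact List.mem_append.2 (Or.inr (List.mem_append.2 (Or.inl h)))
            · have := hmem2 nx' hm
              rw [← List.append_assoc] at *
              exact this
          · intro y hy
            rcases List.mem_append.1 hy with h | h
            · exact ⟨nx, by simp, hconn1 y h⟩
            · obtain ⟨nx', hnx', hc⟩ := hconn2 y h
              exact ⟨nx', by simp [hnx'], hc⟩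
          · intro y hy z hz
            rcases List.mem_append.1 hy with h | h
            · have := hcl1 y h z hz
              rcases List.mem_append.1 this with h' | h'
              · exact List.mem_append.2 (Or.inl h')
              · exact List.mem_append.2 (Or.inr (List.mem_append.2 (Or.inl h')))
            · have := hcl2 y h z hz
              rw [← List.append_assoc] at *
              exact this
      have hconts : ∀ nx ∈ (pvBuildGraph pairs).getD x [], (pvBuildGraph pairs).contains nx = true := by
        intro nx hnx
        have hstep := (pvBuildGraph_adj pairs x nx).1 hnx
        exact (pvBuildGraph_contains pairs nx).2 ⟨x, pvStep_symm hstep⟩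
      obtain ⟨Δ', heq', hnd', hmem', hconn', hcl'⟩ :=
        hfold ((pvBuildGraph pairs).getD x []) hconts (seen ++ [x]) (idx ++ [x])
          (tmp ++ [PySem.List.pyGetD s.toList x ' ']) hnd1 hfuel1
      refine ⟨x :: Δ', ?_, ?_, ?_, ?_, ?_⟩
      · show (if PySem.Set.contains seen x then _ else _) = _
        rw [if_neg (fun hc => hxseen ((PySem.Set.contains_iff ..).1 hc))]
        show ((pvBuildGraph pairs).getD x []).foldl _
          (PySem.Set.add seen x, idx ++ [x], tmp ++ [PySem.List.pyGetD s.toList x ' ']) = _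
        rw [hadd, heq']
        simp [List.append_assoc]
      · rw [show seen ++ x :: Δ' = (seen ++ [x]) ++ Δ' by simp]
        exact hnd'
      · simp
      · intro y hy
        rcases List.mem_cons.1 hy with rfl | hm
        · exact Relation.ReflTransGen.refl
        · obtain ⟨nx, hnx, hc⟩ := hconn' y hm
          exact Relation.ReflTransGen.head ((pvBuildGraph_adj pairs x nx).1 hnx) hc
      · intro y hy z hz
        rw [show seen ++ x :: Δ' = (seen ++ [x]) ++ Δ' by simp]
        rcases List.mem_cons.1 hy with rfl | hm
        · exact hmem' z ((pvBuildGraph_adj pairs y z).2 hz)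
        · exact hcl' y hm z hz

-- ---- A's main loop ----

def pvInvA (s : String) (pairs : List (List Int)) (m : Nat) (st : List Int × List Char) : Prop :=
  st.1.Nodup ∧
  (∀ y, y ∈ st.1 ↔ ∃ j : Nat, j < m ∧ pvHasEdge pairs (j : Int) ∧ pvConn pairs (j : Int) y) ∧
  st.2.length = s.toList.length ∧
  (∀ p : Nat, p < s.toList.length →
      st.2.getD p ' ' = if (p : Int) ∈ st.1 then pvTarget s pairs (p : Int) else s.toList.getD p ' ')

theorem pvInvA_step {s : String} {pairs : List (List Int)} (hP : Pre_doit_dfs s pairs)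
    {m : Nat} {st : List Int × List Char} (hm : m < s.toList.length)
    (h : pvInvA s pairs m st) :
    pvInvA s pairs (m + 1) (pvStepA s.toList (pvBuildGraph pairs) st (m : Int)) := by
  obtain ⟨hnd, hiff, hlen, hgrp⟩ := h
  by_cases hseen : (m : Int) ∈ st.1
  · -- already visited: skip
    have hcond : (PySem.Set.contains st.1 (m : Int) || !(pvBuildGraph pairs).contains (m : Int)) = true := by
      rw [(PySem.Set.contains_iff ..).mpr hseen]; rfl
    have hstep : pvStepA s.toList (pvBuildGraph pairs) st (m : Int) = st := by
      unfold pvStepA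
      rw [if_pos hcond]
    rw [hstep]
    obtain ⟨j0, hj0, hedge0, hconn0⟩ := (hiff _).1 hseen
    refine ⟨hnd, ?_, hlen, ?_⟩
    · intro y
      rw [hiff y]
      constructor
      · rintro ⟨j, hj, he, hc⟩; exact ⟨j, by omega, he, hc⟩
      · rintro ⟨j, hj, he, hc⟩
        rcases Nat.lt_or_ge j m with hlt | hge
        · exact ⟨j, hlt, he, hc⟩
        · have hjm : j = m := by omega
          subst hjm
          exact ⟨j0, hj0, hedge0, hconn0.trans hc⟩
    · exact hgrp
  · by_cases hcont : (pvBuildGraph pairs).contains (m : Int) = true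
    · -- fresh component: run the dfs and assign it
      have hfuel : pvUnseen (pvBuildGraph pairs) st.1 < (pvBuildGraph pairs).keys.length + 1 :=
        Nat.lt_succ_of_le (List.length_filter_le ..)
      obtain ⟨Δ, heq, hndΔ, hmΔ, hconnΔ, hclΔ⟩ :=
        pvDfsA_spec ((pvBuildGraph pairs).keys.length + 1) (m : Int) st.1 [] [] hnd hcont hfuel
      have hcond : (PySem.Set.contains st.1 (m : Int) || !(pvBuildGraph pairs).contains (m : Int)) = false := by
        have h1 : PySem.Set.contains st.1 (m : Int) = false := by
          rw [Bool.eq_false_iff]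
          intro hc
          exact hseen ((PySem.Set.contains_iff ..).1 hc)
        rw [h1, hcont]
        rfl
      -- old seen is closed under steps
      have hcl_seen : ∀ y ∈ st.1, ∀ z, pvStep pairs y z → z ∈ st.1 := by
        intro y hy z hz
        obtain ⟨j, hj, he, hc⟩ := (hiff y).1 hy
        exact (hiff z).2 ⟨j, hj, he, hc.tail hz⟩
      have hΔnodup : Δ.Nodup := hndΔ.of_append_right
      have hm0 : (0 : Int) ≤ (m : Int) := by omega
      have hmN : ((m : Nat) : Int) < (s.toList.length : Int) := by omega
      have hΔiff : ∀ y, y ∈ Δ ↔ pvConn pairs (m : Int) y := by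
        intro y
        constructor
        · exact hconnΔ y
        · intro hc
          have hS : ∀ w ∈ st.1 ++ Δ, ∀ z, pvStep pairs w z → z ∈ st.1 ++ Δ := by
            intro w hw z hz
            rcases List.mem_append.1 hw with h | h
            · exact List.mem_append.2 (Or.inl (hcl_seen w h z hz))
            · exact hclΔ w h z hz
          have hyS : y ∈ st.1 ++ Δ := by
            induction hc with
            | refl => exact hmΔ
            | tail h1 hs ih => exact hS _ ih _ hs
          rcases List.mem_append.1 hyS with hyseen | hyΔ
          · obtain ⟨j, hj, he, hcj⟩ := (hiff y).1 hyseen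
            exact absurd ((hiff _).2 ⟨j, hj, he, hcj.trans (pvConn_symm hc)⟩) hseen
          · exact hyΔ
      have hlab_iff : ∀ p : Int, 0 ≤ p → p < (s.toList.length : Int) →
          (pvLab s pairs p = pvLab s pairs (m : Int) ↔ pvConn pairs (m : Int) p) := by
        intro p hp0 hpN
        unfold pvLab
        rw [pvLabels_iff p (m : Int) hp0 hpN hm0 hmN,
          ← pvConn_iff_good hP ⟨hp0, hpN⟩]
        exact ⟨fun hc => pvConn_symm hc, fun hc => pvConn_symm hc⟩
      have hperm : (pvComp s pairs (m : Int)).Perm Δ := by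
        rw [List.perm_ext_iff_of_nodup (pvComp_nodup ..) hΔnodup]
        intro a
        rw [mem_pvComp, hΔiff a]
        constructor
        · rintro ⟨hr, hl⟩
          exact (hlab_iff a hr.1 hr.2).1 hl
        · intro hc
          have hr := pvConn_range hP hc ⟨hm0, hmN⟩
          exact ⟨hr, (hlab_iff a hr.1 hr.2).2 hc⟩
      have hidxS : PySem.List.sorted Δ (fun x => x) false = pvComp s pairs (m : Int) :=
        PySem.List.sorted_eq_of_perm_of_pairwise_lt Δ (pvComp s pairs (m : Int)) (fun x => x)
          hperm (pvComp_pairwise s pairs (m : Int))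
      have htmpS : PySem.List.sorted (Δ.map (fun i => PySem.List.pyGetD s.toList i ' ')) (fun c => c) false =
          PySem.List.sorted ((pvComp s pairs (m : Int)).map (fun i => PySem.List.pyGetD s.toList i ' '))
            (fun c => c) false :=
        PySem.List.sorted_eq_sorted_of_perm _ _ _ (fun _ _ hcc => hcc)
          (hperm.symm.map (fun i => PySem.List.pyGetD s.toList i ' '))
      have hcomplen : (pvComp s pairs (m : Int)).length =
          (PySem.List.sorted ((pvComp s pairs (m : Int)).map (fun i => PySem.List.pyGetD s.toList i ' '))
            (fun c => c) false).length := by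
        rw [PySem.List.length_sorted, List.length_map]
      have hstep : pvStepA s.toList (pvBuildGraph pairs) st (m : Int) =
          (st.1 ++ Δ, pvAssign s.toList st.2 (pvComp s pairs (m : Int))) := by
        unfold pvStepA
        rw [if_neg (fun hc => by rw [hcond] at hc; exact Bool.false_ne_true hc)]
        rw [heq]
        simp only [List.nil_append]
        rw [hidxS, htmpS, pvRangeFold_eq_zip _ _ _ hcomplen]
        rfl
      rw [hstep]
      obtain ⟨halen, hassign⟩ := pvAssignComp_spec (m : Int) st.2 hlen
      refine ⟨hndΔ, ?_, halen, ?_⟩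
      · intro y
        constructor
        · intro hy
          rcases List.mem_append.1 hy with hy | hy
          · obtain ⟨j, hj, he, hc⟩ := (hiff y).1 hy
            exact ⟨j, by omega, he, hc⟩
          · exact ⟨m, by omega, (pvBuildGraph_contains pairs _).1 hcont, (hΔiff y).1 hy⟩
        · rintro ⟨j, hj, he, hc⟩
          rcases Nat.lt_or_ge j m with hlt | hge
          · exact List.mem_append.2 (Or.inl ((hiff y).2 ⟨j, hlt, he, hc⟩))
          · have hjm : j = m := by omega
            subst hjm
            exact List.mem_append.2 (Or.inr ((hΔiff y).2 hc))
      · intro p hp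
        rw [hassign p hp]
        have hp0 : (0 : Int) ≤ (p : Int) := by omega
        have hpN : ((p : Nat) : Int) < (s.toList.length : Int) := by omega
        by_cases hl : pvLab s pairs (p : Int) = pvLab s pairs (m : Int)
        · rw [if_pos hl]
          have hpΔ : (p : Int) ∈ Δ := (hΔiff _).2 ((hlab_iff _ hp0 hpN).1 hl)
          rw [if_pos (List.mem_append.2 (Or.inr hpΔ))]
        · rw [if_neg hl, hgrp p hp]
          have hpΔ : (p : Int) ∉ Δ := fun hc => hl ((hlab_iff _ hp0 hpN).2 ((hΔiff _).1 hc))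
          by_cases hpseen : (p : Int) ∈ st.1
          · rw [if_pos hpseen, if_pos (List.mem_append.2 (Or.inl hpseen))]
          · rw [if_neg hpseen, if_neg (by
              intro hc
              rcases List.mem_append.1 hc with h | h
              · exact hpseen h
              · exact hpΔ h)]
    · -- isolated index: skip
      have hcond : (PySem.Set.contains st.1 (m : Int) || !(pvBuildGraph pairs).contains (m : Int)) = true := by
        rw [Bool.eq_false_iff.2 (fun hc => hcont hc)]
        simp
      have hstep : pvStepA s.toList (pvBuildGraph pairs) st (m : Int) = st := by
        unfold pvStepA
        rw [if_pos hcond]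
      rw [hstep]
      refine ⟨hnd, ?_, hlen, hgrp⟩
      intro y
      rw [hiff y]
      constructor
      · rintro ⟨j, hj, he, hc⟩; exact ⟨j, by omega, he, hc⟩
      · rintro ⟨j, hj, he, hc⟩
        rcases Nat.lt_or_ge j m with hlt | hge
        · exact ⟨j, hlt, he, hc⟩
        · have hjm : j = m := by omega
          subst hjm
          exact absurd ((pvBuildGraph_contains pairs _).2 he) (by simpa using hcont)

theorem pvInvA_final {s : String} {pairs : List (List Int)} (hP : Pre_doit_dfs s pairs) :
    ∀ m : Nat, m ≤ s.toList.length →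
      pvInvA s pairs m
        ((PySem.List.pyRange 0 (m : Int) 1).foldl (pvStepA s.toList (pvBuildGraph pairs)) ([], s.toList)) := by
  intro m
  induction m with
  | zero =>
    intro _
    rw [PySem.List.pyRange_one_eq_nil (by omega), List.foldl_nil]
    refine ⟨List.nodup_nil, ?_, rfl, ?_⟩
    · intro y
      simp
    · intro p hp
      rw [if_neg (by simp)]
  | succ m ihm =>
    intro hm1
    have hm : m < s.toList.length := by omega
    have hcast : ((m + 1 : Nat) : Int) = (m : Int) + 1 := by push_cast; ring
    rw [hcast, PySem.List.pyRange_one_succ_right (a := 0) (b := (m : Int)) (by omega), List.foldl_append,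
      List.foldl_cons, List.foldl_nil]
    exact pvInvA_step hP hm (ihm (by omega))

-- ---- B's main loop ----

theorem pvB_out {s : String} {pairs : List (List Int)} :
    ((doit_dfs_alt s pairs).toList.length = s.toList.length) ∧
    ∀ p : Nat, p < s.toList.length →
      (doit_dfs_alt s pairs).toList.getD p ' ' = pvTarget s pairs (p : Int) := by
  have hgetD : ∀ c : Int,
      ((PySem.List.pyRange 0 (PySem.List.len s.toList) 1).foldl
        (fun (d : PySem.Dict Int (List Int)) i =>
          d.modify (PySem.List.pyGetD (pvLabels (PySem.List.len s.toList) pairs) i 0) [] (· ++ [i]))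
        PySem.Dict.empty).getD c [] =
      (PySem.List.pyRange 0 (PySem.List.len s.toList) 1).filter (fun i => pvLab s pairs i == c) := by
    intro c
    rw [show (PySem.List.pyRange 0 (PySem.List.len s.toList) 1).foldl
        (fun (d : PySem.Dict Int (List Int)) i =>
          d.modify (PySem.List.pyGetD (pvLabels (PySem.List.len s.toList) pairs) i 0) [] (· ++ [i]))
        PySem.Dict.empty =
        ((PySem.List.pyRange 0 (PySem.List.len s.toList) 1).map
          (fun i => (pvLab s pairs i, i))).foldl
        (fun (d : PySem.Dict Int (List Int)) p => d.modify p.1 [] (· ++ [p.2]))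
        PySem.Dict.empty from (List.foldl_map
          (f := fun i : Int => (pvLab s pairs i, i))
          (g := fun (d : PySem.Dict Int (List Int)) p => d.modify p.1 [] (· ++ [p.2]))).symm]
    rw [PySem.Dict.getD_foldl_modify_append]
    rw [PySem.Dict.getD_empty, List.nil_append, List.filter_map]
    rw [List.map_map]
    show List.map (Prod.snd ∘ fun i => (pvLab s pairs i, i)) _ = _
    rw [show (Prod.snd ∘ fun i : Int => (pvLab s pairs i, i)) = id from rfl, List.map_id]
    rfl
  have hknd : ((PySem.List.pyRange 0 (PySem.List.len s.toList) 1).foldl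
        (fun (d : PySem.Dict Int (List Int)) i =>
          d.modify (PySem.List.pyGetD (pvLabels (PySem.List.len s.toList) pairs) i 0) [] (· ++ [i]))
        PySem.Dict.empty).keys.Nodup :=
    PySem.Dict.nodup_keys_foldl_modify_key _ _ _ _ _ (by simp [PySem.Dict.keys_empty])
  have hkeys : ((PySem.List.pyRange 0 (PySem.List.len s.toList) 1).foldl
        (fun (d : PySem.Dict Int (List Int)) i =>
          d.modify (PySem.List.pyGetD (pvLabels (PySem.List.len s.toList) pairs) i 0) [] (· ++ [i]))
        PySem.Dict.empty).keys =
      PySem.Set.ofList ((PySem.List.pyRange 0 (PySem.List.len s.toList) 1).map (fun i => pvLab s pairs i)) := by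
    rw [PySem.Dict.keys_foldl_modify_key]
    rw [show (PySem.Dict.empty : PySem.Dict Int (List Int)).keys = [] from rfl]
    exact PySem.Set.update_nil_left _
  -- the fold over the values, rewritten as a fold over the (distinct) label values
  have hloop : ∀ (ks : List Int) (done : List Int) (gl : List Char),
      (∀ k ∈ ks, ∃ q : Nat, q < s.toList.length ∧ pvLab s pairs (q : Int) = k) →
      gl.length = s.toList.length →
      (∀ p : Nat, p < s.toList.length → gl.getD p ' ' =
        if pvLab s pairs (p : Int) ∈ done then pvTarget s pairs (p : Int) else s.toList.getD p ' ') →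
      (ks.foldl (fun gl k => pvAssign s.toList gl
          (((PySem.List.pyRange 0 (PySem.List.len s.toList) 1).foldl
            (fun (d : PySem.Dict Int (List Int)) i =>
              d.modify (PySem.List.pyGetD (pvLabels (PySem.List.len s.toList) pairs) i 0) [] (· ++ [i]))
            PySem.Dict.empty).getD k [])) gl).length = s.toList.length ∧
      (∀ p : Nat, p < s.toList.length →
        (ks.foldl (fun gl k => pvAssign s.toList gl
          (((PySem.List.pyRange 0 (PySem.List.len s.toList) 1).foldl
            (fun (d : PySem.Dict Int (List Int)) i =>
              d.modify (PySem.List.pyGetD (pvLabels (PySem.List.len s.toList) pairs) i 0) [] (· ++ [i]))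
            PySem.Dict.empty).getD k [])) gl).getD p ' ' =
        if pvLab s pairs (p : Int) ∈ done ++ ks then pvTarget s pairs (p : Int) else s.toList.getD p ' ') := by
    intro ks
    induction ks with
    | nil =>
      intro done gl _ hlen hinv
      refine ⟨hlen, ?_⟩
      intro p hp
      rw [List.foldl_nil, hinv p hp, List.append_nil]
    | cons k ks ih =>
      intro done gl hks hlen hinv
      obtain ⟨q, hq, hkq⟩ := hks k (by simp)
      have hgrp : ((PySem.List.pyRange 0 (PySem.List.len s.toList) 1).foldl
            (fun (d : PySem.Dict Int (List Int)) i =>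
              d.modify (PySem.List.pyGetD (pvLabels (PySem.List.len s.toList) pairs) i 0) [] (· ++ [i]))
            PySem.Dict.empty).getD k [] = pvComp s pairs (q : Int) := by
        rw [hgetD k]
        unfold pvComp
        rw [hkq]
      obtain ⟨halen, hassign⟩ := pvAssignComp_spec (q : Int) gl hlen
      rw [List.foldl_cons, hgrp]
      refine ih (done ++ [k]) _ (fun k' hk' => hks k' (by simp [hk'])) halen ?_ |>.imp id ?_
      · intro p hp
        rw [hassign p hp]
        by_cases hl : pvLab s pairs (p : Int) = k
        · rw [if_pos (hl.trans hkq.symm), if_pos (by simp [hl])]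
        · rw [if_neg (fun hc => hl (hc.trans hkq)), hinv p hp]
          by_cases hd : pvLab s pairs (p : Int) ∈ done
          · rw [if_pos hd, if_pos (by simp [hd])]
          · rw [if_neg hd, if_neg (by
              intro hc
              rcases List.mem_append.1 hc with h | h
              · exact hd h
              · exact hl (by simpa using h))]
      · intro hres p hp
        rw [hres p hp, show done ++ [k] ++ ks = done ++ (k :: ks) by simp]
  have htl : (doit_dfs_alt s pairs).toList =
      (((PySem.List.pyRange 0 (PySem.List.len s.toList) 1).foldl
        (fun (d : PySem.Dict Int (List Int)) i =>
          d.modify (PySem.List.pyGetD (pvLabels (PySem.List.len s.toList) pairs) i 0) [] (· ++ [i]))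
        PySem.Dict.empty).values.foldl (pvAssign s.toList) s.toList) := by
    show (String.ofList _).toList = _
    simp
  rw [htl]
  rw [PySem.Dict.values_eq_map_keys _ hknd [], List.foldl_map]
  have hwit : ∀ k ∈ ((PySem.List.pyRange 0 (PySem.List.len s.toList) 1).foldl
        (fun (d : PySem.Dict Int (List Int)) i =>
          d.modify (PySem.List.pyGetD (pvLabels (PySem.List.len s.toList) pairs) i 0) [] (· ++ [i]))
        PySem.Dict.empty).keys,
      ∃ q : Nat, q < s.toList.length ∧ pvLab s pairs (q : Int) = k := by
    intro k hk
    rw [hkeys, PySem.Set.mem_ofList, List.mem_map] at hk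
    obtain ⟨i, hi, hik⟩ := hk
    rw [PySem.List.mem_pyRange_one] at hi
    simp only [PySem.List.len_eq] at hi
    refine ⟨i.toNat, by omega, ?_⟩
    rw [show ((i.toNat : Nat) : Int) = i by omega]
    exact hik
  obtain ⟨hlenf, hgetf⟩ := hloop _ [] s.toList hwit rfl (by
    intro p hp
    rw [if_neg (by simp)])
  refine ⟨hlenf, ?_⟩
  intro p hp
  rw [hgetf p hp, List.nil_append, if_pos ?_]
  rw [hkeys, PySem.Set.mem_ofList, List.mem_map]
  exact ⟨(p : Int), by rw [PySem.List.mem_pyRange_one]; simp only [PySem.List.len_eq]; omega, rfl⟩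

-- ===== VERDICT (by name: the statement is the Claim_ definition above) =====
theorem pvEqOfGetD {l1 l2 : List Char} (hl : l1.length = l2.length)
    (h : ∀ p : Nat, p < l1.length → l1.getD p ' ' = l2.getD p ' ') : l1 = l2 := by
  apply List.ext_getElem hl
  intro i hi1 hi2
  rw [← List.getD_eq_getElem l1 ' ' hi1, ← List.getD_eq_getElem l2 ' ' hi2]
  exact h i hi1

theorem doit_dfs_spec : Claim_equal_doit_dfs := by
  intro s pairs _ hP
  show doit_dfs s pairs = doit_dfs_alt s pairs
  obtain ⟨_, hiff, hlenA, hgrpA⟩ := pvInvA_final hP s.toList.length (le_refl _)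
  have htlA : (doit_dfs s pairs).toList =
      ((PySem.List.pyRange 0 ((s.toList.length : Nat) : Int) 1).foldl
        (pvStepA s.toList (pvBuildGraph pairs)) ([], s.toList)).2 := by
    show (String.ofList _).toList = _
    simp
  obtain ⟨hlenB, hgetB⟩ := pvB_out (s := s) (pairs := pairs)
  apply String.toList_inj.mp
  apply pvEqOfGetD
  · rw [htlA, hlenA, hlenB]
  · intro p hp
    have hpn : p < s.toList.length := by
      have hp2 := hp
      rw [htlA, hlenA] at hp2
      exact hp2
    rw [hgetB p hpn, htlA, hgrpA p hpn]
    by_cases hmem : (p : Int) ∈ ((PySem.List.pyRange 0 ((s.toList.length : Nat) : Int) 1).foldl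
        (pvStepA s.toList (pvBuildGraph pairs)) ([], s.toList)).1
    · rw [if_pos hmem]
    · rw [if_neg hmem]
      have hno : ¬ pvHasEdge pairs (p : Int) := by
        intro he
        exact hmem ((hiff _).2 ⟨p, hpn, he, Relation.ReflTransGen.refl⟩)
      rw [pvTarget_isolated ⟨by omega, by omega⟩ hno]
      rw [show ((p : Int)).toNat = p by omega]
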